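-- pv_equiv track=rewrite | github.com/cacaomacao/critical_brain | dcm_izhik.py | analyze_avalanches
-- ===== SOURCE A (Python) =====
-- def analyze_avalanches(all_firings, num_agents):
--     avalanche_sizes = []
--     avalanche_durations = []
--
--     for agent_idx in range(num_agents):
--         agent_firings = [firing for step_firings in all_firings for firing in step_firings[agent_idx]]
--         current_avalanche_size = 0
--         current_avalanche_duration = 0
--
--         for step in agent_firings:
--             if len(step) > 0:
--                 current_avalanche_size += len(step)
--                 current_avalanche_duration += 1
--             elif current_avalanche_size > 0:
--                 avalanche_sizes.append(current_avalanche_size)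
--                 avalanche_durations.append(current_avalanche_duration)
--                 current_avalanche_size = 0
--                 current_avalanche_duration = 0
--
--     return avalanche_sizes, avalanche_durations
-- ===== SOURCE B (Python) =====
-- def analyze_avalanches(all_firings, num_agents):
--     avalanche_sizes = []
--     avalanche_durations = []
--     for agent_idx in range(num_agents):
--         agent_firings = [firing for step_firings in all_firings for firing in step_firings[agent_idx]]
--         # group the step sequence into maximal runs of active / silent steps
--         # (runs accumulated newest-first, then put back in order)
--         rev_runs = []
--         for step in agent_firings:
--             key = len(step) > 0
--             if rev_runs and rev_runs[0][0] == key: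
--                 rev_runs[0] = (key, rev_runs[0][1] + [step])
--             else:
--                 rev_runs = [(key, [step])] + rev_runs
--         runs = rev_runs[::-1]
--         # every active run except a trailing one is a completed avalanche
--         for key, group in runs[:-1]:
--             if key:
--                 avalanche_sizes.append(sum(len(s) for s in group))
--                 avalanche_durations.append(len(group))
--     return avalanche_sizes, avalanche_durations
-- ===== Notes on version B (the rewrite author's own statement) =====
-- stated objective: alternative
-- what changed: B replaces A's stateful size/duration counters with a run-length grouping pass: it splits each agent's step sequence into maximal active/silent runs and emits (sum of lengths, run length) for every active run except a trailing one (A never flushes an avalanche still open at the end).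
import Mathlib
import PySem

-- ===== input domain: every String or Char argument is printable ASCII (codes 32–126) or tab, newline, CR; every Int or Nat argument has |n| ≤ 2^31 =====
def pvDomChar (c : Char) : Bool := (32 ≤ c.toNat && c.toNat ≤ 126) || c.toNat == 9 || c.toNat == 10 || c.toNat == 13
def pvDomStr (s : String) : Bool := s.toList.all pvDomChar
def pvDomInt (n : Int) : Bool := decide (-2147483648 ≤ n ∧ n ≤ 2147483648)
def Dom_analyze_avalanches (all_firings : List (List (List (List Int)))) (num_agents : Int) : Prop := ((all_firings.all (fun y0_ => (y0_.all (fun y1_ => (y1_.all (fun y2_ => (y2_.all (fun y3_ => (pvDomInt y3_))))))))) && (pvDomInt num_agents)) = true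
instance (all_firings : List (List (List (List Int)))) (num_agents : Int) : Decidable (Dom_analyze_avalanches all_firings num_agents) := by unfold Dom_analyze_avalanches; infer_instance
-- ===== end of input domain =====

-- B groups each agent's step sequence into maximal active/silent runs and emits one
-- (size, duration) pair per completed active run, instead of A's stateful counters.
-- Equivalence is about the RETURN value on Pre_ (the inputs where Python A does not raise).

-- ===== PORT A =====
def analyze_avalanches (all_firings : List (List (List (List Int)))) (num_agents : Int) : List Int × List Int :=
  (PySem.List.pyRange 0 num_agents 1).foldl
    (fun (acc : List Int × List Int) agent_idx =>
      let agent_firings : List (List Int) :=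
        all_firings.flatMap (fun step_firings => (PySem.List.pyGet? step_firings agent_idx).getD [])
      let r := agent_firings.foldl
        (fun (t : List Int × List Int × Int × Int) step =>
          if 0 < step.length then
            (t.1, t.2.1, t.2.2.1 + (step.length : Int), t.2.2.2 + 1)
          else if 0 < t.2.2.1 then
            (t.1 ++ [t.2.2.1], t.2.1 ++ [t.2.2.2], 0, 0)
          else t)
        (acc.1, acc.2, 0, 0)
      (r.1, r.2.1))
    ([], [])

-- ===== PORT B =====
-- one step of B's run-grouping loop (runs kept newest-first, as in Source B)
def pvRunStep (acc : List (Bool × List (List Int))) (step : List Int) : List (Bool × List (List Int)) :=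
  let key := decide (0 < step.length)
  match acc with
  | (k, g) :: rest => if k == key then (key, g ++ [step]) :: rest else (key, [step]) :: (k, g) :: rest
  | [] => [(key, [step])]

def analyze_avalanches_alt (all_firings : List (List (List (List Int)))) (num_agents : Int) : List Int × List Int :=
  (PySem.List.pyRange 0 num_agents 1).foldl
    (fun (acc : List Int × List Int) agent_idx =>
      let agent_firings : List (List Int) :=
        all_firings.flatMap (fun step_firings => (PySem.List.pyGet? step_firings agent_idx).getD [])
      let runs := (agent_firings.foldl pvRunStep []).reverse
      runs.dropLast.foldl
        (fun (a : List Int × List Int) kg =>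
          if kg.1 then
            (a.1 ++ [kg.2.foldl (fun s x => s + (x.length : Int)) 0], a.2 ++ [(kg.2.length : Int)])
          else a)
        acc)
    ([], [])

-- ===== PRECONDITION & SPEC =====
-- Pre_ excludes exactly the inputs on which Python A raises IndexError:
-- some agent index in range(num_agents) out of range for some step_firings.
def Pre_analyze_avalanches (all_firings : List (List (List (List Int)))) (num_agents : Int) : Prop :=
  ∀ sf ∈ all_firings, num_agents ≤ (sf.length : Int)
instance (all_firings : List (List (List (List Int)))) (num_agents : Int) : Decidable (Pre_analyze_avalanches all_firings num_agents) := by unfold Pre_analyze_avalanches; infer_instance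
def pvWitness_analyze_avalanches : List (List (List (List Int))) × Int := ([[[[1], []]]], 1)

def Spec_analyze_avalanches (all_firings : List (List (List (List Int)))) (num_agents : Int) (out : List Int × List Int) : Prop := out = analyze_avalanches_alt all_firings num_agents
instance (all_firings : List (List (List (List Int)))) (num_agents : Int) (out : List Int × List Int) : Decidable (Spec_analyze_avalanches all_firings num_agents out) := by unfold Spec_analyze_avalanches; infer_instance

-- ===== CLAIM (what is proved, stated in full; the proofs are below) =====
def Claim_equal_analyze_avalanches : Prop := ∀ (all_firings : List (List (List (List Int)))) (num_agents : Int), Dom_analyze_avalanches all_firings num_agents → Pre_analyze_avalanches all_firings num_agents → Spec_analyze_avalanches all_firings num_agents (analyze_avalanches all_firings num_agents)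

-- ===== LEMMAS AND PROOFS =====

-- pure emissions of A's inner loop, as a recursion
def pvScan : List (List Int) → Int → Int → List Int × List Int
  | [], _, _ => ([], [])
  | x :: xs, cs, cd =>
    if 0 < x.length then pvScan xs (cs + (x.length : Int)) (cd + 1)
    else if 0 < cs then ((cs :: (pvScan xs 0 0).1), (cd :: (pvScan xs 0 0).2))
    else pvScan xs cs cd

def pvSumLen (g : List (List Int)) : Int := g.foldl (fun s x => s + (x.length : Int)) 0

-- run decomposition, forward-recursive reference version
def pvRunsRec : List (List Int) → List (Bool × List (List Int))
  | [] => []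
  | x :: xs =>
    let key := decide (0 < x.length)
    match pvRunsRec xs with
    | (k, g) :: r => if k == key then (key, x :: g) :: r else (key, [x]) :: (k, g) :: r
    | [] => [(key, [x])]

def pvConsRun (k : Bool) (g : List (List Int)) (r : List (Bool × List (List Int))) : List (Bool × List (List Int)) :=
  match r with
  | (k', h) :: r' => if k' == k then (k, g ++ h) :: r' else (k, g) :: (k', h) :: r'
  | [] => [(k, g)]

def pvEmit : List (Bool × List (List Int)) → List Int × List Int
  | [] => ([], [])
  | (k, g) :: r => if k then ((pvSumLen g) :: (pvEmit r).1, ((g.length : Int)) :: (pvEmit r).2) else pvEmit r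

def pvE (r : List (Bool × List (List Int))) : List Int × List Int := pvEmit r.dropLast

def pvMergeH (cs cd : Int) : List (Bool × List (List Int)) → List Int × List Int
  | [] => ([], [])
  | (true, g) :: rest =>
      if rest = [] then ([], [])
      else ((cs + pvSumLen g) :: (pvE rest).1, (cd + (g.length : Int)) :: (pvE rest).2)
  | (false, g) :: rest =>
      (cs :: (pvE ((false, g) :: rest)).1, cd :: (pvE ((false, g) :: rest)).2)

theorem pvSumLen_shift (g : List (List Int)) : ∀ a : Int, g.foldl (fun s x => s + (x.length : Int)) a = a + pvSumLen g := by
  induction g with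
  | nil => intro a; simp [pvSumLen]
  | cons x g ih =>
    intro a
    rw [List.foldl_cons, ih]
    conv_rhs => rw [pvSumLen, List.foldl_cons, ih]
    ring

theorem pvSumLen_cons (x : List Int) (g : List (List Int)) : pvSumLen (x :: g) = (x.length : Int) + pvSumLen g := by
  have h : pvSumLen (x :: g) = g.foldl (fun s x => s + (x.length : Int)) (0 + (x.length : Int)) := rfl
  rw [h, pvSumLen_shift]; ring

theorem pvE_false_cons (h : List (List Int)) (r : List (Bool × List (List Int))) : pvE ((false, h) :: r) = pvE r := by
  cases r with
  | nil => simp [pvE, pvEmit]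
  | cons y r' => simp [pvE, List.dropLast, pvEmit]

theorem pvE_true_cons (g : List (List Int)) (r : List (Bool × List (List Int))) (hr : r ≠ []) :
    pvE ((true, g) :: r) = (pvSumLen g :: (pvE r).1, (g.length : Int) :: (pvE r).2) := by
  cases r with
  | nil => exact absurd rfl hr
  | cons y r' => simp [pvE, List.dropLast, pvEmit]

theorem pvRunsRec_cons (x : List Int) (xs : List (List Int)) :
    pvRunsRec (x :: xs) = pvConsRun (decide (0 < x.length)) [x] (pvRunsRec xs) := by
  simp only [pvRunsRec, pvConsRun]
  cases h : pvRunsRec xs with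
  | nil => rfl
  | cons p r =>
    obtain ⟨k, g⟩ := p
    by_cases hk : k = decide (0 < x.length) <;> simp [hk]

theorem pvConsRun_consRun_eq (k : Bool) (g : List (List Int)) (x : List Int) (r : List (Bool × List (List Int))) :
    pvConsRun k g (pvConsRun k [x] r) = pvConsRun k (g ++ [x]) r := by
  cases r with
  | nil => simp [pvConsRun]
  | cons p r' =>
    obtain ⟨k', h⟩ := p
    by_cases hk : k' = k <;> simp [pvConsRun, hk]

theorem pvConsRun_consRun_ne (k key : Bool) (g : List (List Int)) (x : List Int) (r : List (Bool × List (List Int))) (hne : key ≠ k) :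
    pvConsRun k g (pvConsRun key [x] r) = (k, g) :: pvConsRun key [x] r := by
  cases r with
  | nil => simp [pvConsRun, hne]
  | cons p r' =>
    obtain ⟨k', h⟩ := p
    by_cases hk : k' = key <;> simp [pvConsRun, hk, hne]

theorem pvFold_runs (steps : List (List Int)) : ∀ (k : Bool) (g : List (List Int)) (rest : List (Bool × List (List Int))),
    List.foldl pvRunStep ((k, g) :: rest) steps = (pvConsRun k g (pvRunsRec steps)).reverse ++ rest := by
  induction steps with
  | nil => intro k g rest; simp [pvRunsRec, pvConsRun]
  | cons x xs ih =>
    intro k g rest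
    rw [List.foldl_cons]
    by_cases hk : k = decide (0 < x.length)
    · have hstep : pvRunStep ((k, g) :: rest) x = (decide (0 < x.length), g ++ [x]) :: rest := by
        simp only [pvRunStep]; rw [if_pos (by simp [hk])]
      rw [hstep, ih, pvRunsRec_cons, ← hk, pvConsRun_consRun_eq]
    · have hstep : pvRunStep ((k, g) :: rest) x = (decide (0 < x.length), [x]) :: (k, g) :: rest := by
        simp only [pvRunStep]; rw [if_neg (by simp [hk])]
      rw [hstep, ih, pvRunsRec_cons, pvConsRun_consRun_ne _ _ _ _ _ (fun h => hk h.symm)]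
      simp

theorem pvRuns_eq (steps : List (List Int)) : (List.foldl pvRunStep [] steps).reverse = pvRunsRec steps := by
  cases steps with
  | nil => simp [pvRunsRec]
  | cons x xs =>
    rw [List.foldl_cons]
    have hstep : pvRunStep [] x = [(decide (0 < x.length), [x])] := rfl
    rw [hstep, show ([(decide (0 < x.length), [x])] : List (Bool × List (List Int))) = (decide (0 < x.length), [x]) :: [] from rfl,
        pvFold_runs, pvRunsRec_cons]
    simp

-- unfolding lemmas for pvConsRun / pvMergeH
theorem pvConsRun_same (k : Bool) (g h : List (List Int)) (r' : List (Bool × List (List Int))) :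
    pvConsRun k g ((k, h) :: r') = (k, g ++ h) :: r' := by simp [pvConsRun]

theorem pvConsRun_diff (k k' : Bool) (hne : k' ≠ k) (g h : List (List Int)) (r' : List (Bool × List (List Int))) :
    pvConsRun k g ((k', h) :: r') = (k, g) :: (k', h) :: r' := by simp [pvConsRun, hne]

theorem pvMergeH_true_nil (cs cd : Int) (g : List (List Int)) :
    pvMergeH cs cd [(true, g)] = ([], []) := by rw [pvMergeH, if_pos rfl]

theorem pvMergeH_true (cs cd : Int) (g : List (List Int)) (rest : List (Bool × List (List Int))) (h : rest ≠ []) :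
    pvMergeH cs cd ((true, g) :: rest) = ((cs + pvSumLen g) :: (pvE rest).1, (cd + (g.length : Int)) :: (pvE rest).2) := by
  rw [pvMergeH, if_neg h]

theorem pvMergeH_false (cs cd : Int) (g : List (List Int)) (rest : List (Bool × List (List Int))) :
    pvMergeH cs cd ((false, g) :: rest) = (cs :: (pvE ((false, g) :: rest)).1, cd :: (pvE ((false, g) :: rest)).2) := by
  rw [pvMergeH]

theorem pvSumLen_single (x : List Int) : pvSumLen [x] = (x.length : Int) := by
  rw [pvSumLen_cons]; simp [pvSumLen]

-- the joint scan/runs correspondence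
theorem pvScan_runs (steps : List (List Int)) :
    (pvScan steps 0 0 = pvE (pvRunsRec steps)) ∧
    (∀ cs cd : Int, 0 < cs → pvScan steps cs cd = pvMergeH cs cd (pvRunsRec steps)) := by
  induction steps with
  | nil =>
    refine ⟨by simp [pvScan, pvRunsRec, pvE, pvEmit], ?_⟩
    intro cs cd _; simp [pvScan, pvRunsRec, pvMergeH]
  | cons x xs ih =>
    obtain ⟨ih0, ih1⟩ := ih
    by_cases hx : 0 < x.length
    · -- active step
      have hkey : decide (0 < x.length) = true := by simp [hx]
      have hR := pvRunsRec_cons x xs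
      rw [hkey] at hR
      have hxI : (0 : Int) < (x.length : Int) := by exact_mod_cast hx
      have hmain : ∀ cs cd : Int, 0 ≤ cs →
          pvScan xs (cs + (x.length : Int)) (cd + 1) = pvMergeH cs cd (pvRunsRec (x :: xs)) := by
        intro cs cd hcs
        rw [ih1 _ _ (by omega), hR]
        cases hc : pvRunsRec xs with
        | nil => rw [pvConsRun, pvMergeH_true_nil, pvMergeH]
        | cons p r' =>
          obtain ⟨k, g⟩ := p
          cases k with
          | true =>
            rw [pvConsRun_same]
            cases r' with
            | nil => rw [pvMergeH_true_nil, pvMergeH_true_nil]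
            | cons q r'' =>
              rw [pvMergeH_true _ _ _ _ (by simp), pvMergeH_true _ _ _ _ (by simp)]
              simp only [List.singleton_append, pvSumLen_cons, List.length_cons, Prod.mk.injEq, List.cons.injEq]
              exact ⟨⟨by ring, trivial⟩, ⟨by push_cast; ring, trivial⟩⟩
          | false =>
            rw [pvConsRun_diff _ _ (by simp) _ _ _]
            rw [pvMergeH_true _ _ _ _ (by simp), pvMergeH_false, pvSumLen_single]
            simp
      constructor
      · have h1 : pvScan (x :: xs) 0 0 = pvScan xs (0 + (x.length : Int)) (0 + 1) := by
          rw [pvScan, if_pos hx]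
        rw [h1, hmain 0 0 le_rfl, hR]
        cases hc : pvRunsRec xs with
        | nil => rfl
        | cons p r' =>
          obtain ⟨k, g⟩ := p
          cases k with
          | true =>
            rw [pvConsRun_same]
            cases r' with
            | nil => rfl
            | cons q r'' =>
              rw [pvMergeH_true _ _ _ _ (by simp), pvE_true_cons _ _ (by simp)]
              simp
          | false =>
            rw [pvConsRun_diff _ _ (by simp) _ _ _]
            rw [pvMergeH_true _ _ _ _ (by simp), pvE_true_cons _ _ (by simp), pvSumLen_single]
            simp
      · intro cs cd hcs
        have h1 : pvScan (x :: xs) cs cd = pvScan xs (cs + (x.length : Int)) (cd + 1) := by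
          rw [pvScan, if_pos hx]
        rw [h1, hmain cs cd (le_of_lt hcs)]
    · -- silent step
      have hkey : decide (0 < x.length) = false := by simp [hx]
      have hR := pvRunsRec_cons x xs
      rw [hkey] at hR
      have hEeq : pvE (pvRunsRec (x :: xs)) = pvE (pvRunsRec xs) := by
        rw [hR]
        cases hc : pvRunsRec xs with
        | nil => rfl
        | cons p r' =>
          obtain ⟨k, g⟩ := p
          cases k with
          | true =>
            rw [pvConsRun_diff _ _ (by simp) _ _ _, pvE_false_cons]
          | false =>
            rw [pvConsRun_same, pvE_false_cons, pvE_false_cons]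
      constructor
      · have h1 : pvScan (x :: xs) 0 0 = pvScan xs 0 0 := by
          rw [pvScan, if_neg hx, if_neg (lt_irrefl 0)]
        rw [h1, ih0, hEeq]
      · intro cs cd hcs
        have h1 : pvScan (x :: xs) cs cd = (cs :: (pvScan xs 0 0).1, cd :: (pvScan xs 0 0).2) := by
          rw [pvScan, if_neg hx, if_pos hcs]
        rw [h1, ih0]
        have hhead : ∃ g r, pvRunsRec (x :: xs) = (false, g) :: r := by
          rw [hR]
          cases hc : pvRunsRec xs with
          | nil => exact ⟨[x], [], rfl⟩
          | cons p r' =>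
            obtain ⟨k, g⟩ := p
            cases k with
            | true => exact ⟨[x], (true, g) :: r', by rw [pvConsRun_diff _ _ (by simp) _ _ _]⟩
            | false => exact ⟨[x] ++ g, r', by rw [pvConsRun_same]⟩
        obtain ⟨g, r, hgr⟩ := hhead
        rw [hgr, pvMergeH_false, ← hgr, hEeq]

-- A's inner fold appends exactly pvScan's emissions
theorem pvInnerA (steps : List (List Int)) : ∀ (S D : List Int) (cs cd : Int),
    (steps.foldl
      (fun (t : List Int × List Int × Int × Int) step =>
        if 0 < step.length then
          (t.1, t.2.1, t.2.2.1 + (step.length : Int), t.2.2.2 + 1)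
        else if 0 < t.2.2.1 then
          (t.1 ++ [t.2.2.1], t.2.1 ++ [t.2.2.2], 0, 0)
        else t)
      (S, D, cs, cd)).1
    = S ++ (pvScan steps cs cd).1
    ∧ (steps.foldl
      (fun (t : List Int × List Int × Int × Int) step =>
        if 0 < step.length then
          (t.1, t.2.1, t.2.2.1 + (step.length : Int), t.2.2.2 + 1)
        else if 0 < t.2.2.1 then
          (t.1 ++ [t.2.2.1], t.2.1 ++ [t.2.2.2], 0, 0)
        else t)
      (S, D, cs, cd)).2.1
    = D ++ (pvScan steps cs cd).2 := by
  induction steps with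
  | nil => intro S D cs cd; simp [pvScan]
  | cons x xs ih =>
    intro S D cs cd
    by_cases hx : 0 < x.length
    · simp only [List.foldl_cons, if_pos hx]
      refine ⟨((ih S D _ _).1.trans ?_), ((ih S D _ _).2.trans ?_)⟩ <;>
        rw [pvScan, if_pos hx]
    · by_cases hcs : 0 < cs
      · simp only [List.foldl_cons, if_neg hx, if_pos hcs]
        refine ⟨((ih (S ++ [cs]) (D ++ [cd]) 0 0).1.trans ?_), ((ih (S ++ [cs]) (D ++ [cd]) 0 0).2.trans ?_)⟩ <;>
          rw [pvScan, if_neg hx, if_pos hcs] <;> simp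
      · simp only [List.foldl_cons, if_neg hx, if_neg hcs]
        refine ⟨((ih S D cs cd).1.trans ?_), ((ih S D cs cd).2.trans ?_)⟩ <;>
          rw [pvScan, if_neg hx, if_neg hcs]

-- B's inner fold appends exactly pvEmit of the run list
theorem pvInnerB (r : List (Bool × List (List Int))) : ∀ (S D : List Int),
    r.foldl
      (fun (a : List Int × List Int) kg =>
        if kg.1 then
          (a.1 ++ [kg.2.foldl (fun s x => s + (x.length : Int)) 0], a.2 ++ [(kg.2.length : Int)])
        else a)
      (S, D)
    = (S ++ (pvEmit r).1, D ++ (pvEmit r).2) := by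
  induction r with
  | nil => intro S D; simp [pvEmit]
  | cons p r' ih =>
    intro S D
    obtain ⟨k, g⟩ := p
    cases k with
    | true => simp [List.foldl_cons, ih, pvEmit, pvSumLen, List.append_assoc]
    | false => simp [List.foldl_cons, ih, pvEmit]

-- the per-agent bodies of the two outer folds agree
theorem pvBody (all_firings : List (List (List (List Int)))) (acc : List Int × List Int) (agent_idx : Int) :
    (fun (acc : List Int × List Int) agent_idx =>
      let agent_firings : List (List Int) :=
        all_firings.flatMap (fun step_firings => (PySem.List.pyGet? step_firings agent_idx).getD [])
      let r := agent_firings.foldl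
        (fun (t : List Int × List Int × Int × Int) step =>
          if 0 < step.length then
            (t.1, t.2.1, t.2.2.1 + (step.length : Int), t.2.2.2 + 1)
          else if 0 < t.2.2.1 then
            (t.1 ++ [t.2.2.1], t.2.1 ++ [t.2.2.2], 0, 0)
          else t)
        (acc.1, acc.2, 0, 0)
      (r.1, r.2.1)) acc agent_idx
    = (fun (acc : List Int × List Int) agent_idx =>
      let agent_firings : List (List Int) :=
        all_firings.flatMap (fun step_firings => (PySem.List.pyGet? step_firings agent_idx).getD [])
      let runs := (agent_firings.foldl pvRunStep []).reverse
      runs.dropLast.foldl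
        (fun (a : List Int × List Int) kg =>
          if kg.1 then
            (a.1 ++ [kg.2.foldl (fun s x => s + (x.length : Int)) 0], a.2 ++ [(kg.2.length : Int)])
          else a)
        acc) acc agent_idx := by
  obtain ⟨S, D⟩ := acc
  simp only []
  generalize (all_firings.flatMap (fun step_firings => (PySem.List.pyGet? step_firings agent_idx).getD [])) = af
  have hA := pvInnerA af S D 0 0
  have hB := pvInnerB ((af.foldl pvRunStep []).reverse.dropLast) S D
  have hruns : (af.foldl pvRunStep []).reverse = pvRunsRec af := pvRuns_eq af
  rw [hB, hruns]
  rw [show pvEmit (pvRunsRec af).dropLast = pvScan af 0 0 from by rw [(pvScan_runs af).1]; rfl]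
  exact Prod.ext hA.1 hA.2

-- ===== VERDICT (by name: the statement is the Claim_ definition above) =====
theorem analyze_avalanches_spec : Claim_equal_analyze_avalanches := by
  intro all_firings num_agents _ _
  unfold Spec_analyze_avalanches analyze_avalanches analyze_avalanches_alt
  exact PySem.List.foldl_congr_mem _ _ _ _ (fun acc i _ => pvBody all_firings acc i)
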